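-- pv_equiv track=rewrite | github.com/mkalish/gov-context | gov_context_llm/generate_question_pairs.py | combine_sentences_into_blocks
-- ===== SOURCE A (Python) =====
-- def combine_sentences_into_blocks(sentences, block_size=4):
--     combined_blocks = []
--     current_block = []
--
--     for i, sentence in enumerate(sentences):
--         current_block.append(sentence)
--
--         if (i + 1) % block_size == 0:
--             combined_blocks.append(" ".join(current_block))
--             current_block = []
--
--     # If there are remaining sentences that haven't formed a full block
--     if current_block:
--         combined_blocks.append(" ".join(current_block))
--
--     return combined_blocks
-- ===== SOURCE B (Python) =====
-- def combine_sentences_into_blocks(sentences, block_size=4):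
--     sentences = list(sentences)
--     if not sentences:
--         return []
--     return [" ".join(sentences[:block_size])] + combine_sentences_into_blocks(
--         sentences[block_size:], block_size
--     )
-- ===== Notes on version B (the rewrite author's own statement) =====
-- stated objective: simpler
-- what changed: Replaces the accumulator loop with a modulo counter and trailing-remainder flush by a direct recursion that slices off one block at a time and joins it.
-- outside the precondition, e.g. on combine_sentences_into_blocks(['a', 'b', 'c'], -2): A returns ['a b', 'c'], B does not finish within the time limit; on combine_sentences_into_blocks([], 0): A returns [], B returns []
import Mathlib
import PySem

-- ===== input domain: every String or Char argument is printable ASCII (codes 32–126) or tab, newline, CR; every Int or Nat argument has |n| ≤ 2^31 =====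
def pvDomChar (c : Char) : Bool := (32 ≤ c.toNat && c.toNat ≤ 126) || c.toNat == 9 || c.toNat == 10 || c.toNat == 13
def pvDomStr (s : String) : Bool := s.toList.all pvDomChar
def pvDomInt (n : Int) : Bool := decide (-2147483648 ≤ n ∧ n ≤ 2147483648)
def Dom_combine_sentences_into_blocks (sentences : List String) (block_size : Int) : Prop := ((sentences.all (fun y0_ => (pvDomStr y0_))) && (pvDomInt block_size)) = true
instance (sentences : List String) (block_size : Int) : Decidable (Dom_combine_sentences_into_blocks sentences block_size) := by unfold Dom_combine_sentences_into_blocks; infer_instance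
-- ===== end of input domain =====

-- B replaces A's accumulator loop with a modulo counter and trailing flush by a
-- direct recursion that slices off one block at a time (objective: simpler).

-- ===== PORT A =====
def combine_sentences_into_blocks (sentences : List String) (block_size : Int) : List String :=
  let st := (PySem.List.enumerate sentences 0).foldl
      (fun (st : List String × List String) p =>
        let current_block := st.2 ++ [p.2]
        if PySem.Int.mod (p.1 + 1) block_size = 0 then
          (st.1 ++ [PySem.Str.join " " current_block], ([] : List String))
        else (st.1, current_block))
      ([], [])
  if st.2 ≠ [] then st.1 ++ [PySem.Str.join " " st.2] else st.1

-- ===== PORT B =====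
-- Source B's recursion; the extra Nat is fuel for Lean's termination checker only
-- (with block_size ≥ 1 the list strictly shrinks, so fuel = length is never exhausted).
def combineAltGo : Nat → List String → Int → List String
  | _, [], _ => []
  | 0, _, _ => []
  | fuel + 1, ss, b =>
      PySem.Str.join " " (PySem.List.slice ss none (some b)) ::
        combineAltGo fuel (PySem.List.slice ss (some b) none) b

def combine_sentences_into_blocks_alt (sentences : List String) (block_size : Int) : List String :=
  combineAltGo sentences.length sentences block_size

-- ===== PRECONDITION & SPEC =====
-- Pre_ restricts to the natural domain block_size ≥ 1: for block_size = 0 A raises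
-- ZeroDivisionError on any nonempty input, and for block_size < 0 A's grouping (by the
-- absolute value, via Python's negative-divisor modulo) is outside the function's purpose
-- and B's recursion does not terminate there.
def Pre_combine_sentences_into_blocks (sentences : List String) (block_size : Int) : Prop :=
  1 ≤ block_size
instance (sentences : List String) (block_size : Int) : Decidable (Pre_combine_sentences_into_blocks sentences block_size) := by unfold Pre_combine_sentences_into_blocks; infer_instance

def pvWitness_combine_sentences_into_blocks : List String × Int := (["a", "b", "c"], 2)

def Spec_combine_sentences_into_blocks (sentences : List String) (block_size : Int) (out : List String) : Prop := out = combine_sentences_into_blocks_alt sentences block_size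
instance (sentences : List String) (block_size : Int) (out : List String) : Decidable (Spec_combine_sentences_into_blocks sentences block_size out) := by unfold Spec_combine_sentences_into_blocks; infer_instance

-- ===== CLAIM (what is proved, stated in full; the proofs are below) =====
def Claim_equal_combine_sentences_into_blocks : Prop := ∀ (sentences : List String) (block_size : Int), Dom_combine_sentences_into_blocks sentences block_size → Pre_combine_sentences_into_blocks sentences block_size → Spec_combine_sentences_into_blocks sentences block_size (combine_sentences_into_blocks sentences block_size)

-- ===== LEMMAS AND PROOFS =====

-- fuel irrelevance for B's recursion (any fuel ≥ length works)
lemma combineAltGo_fuel (b : Int) (hb : 1 ≤ b) :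
    ∀ (f1 : Nat), ∀ (f2 : Nat) (ss : List String), ss.length ≤ f1 → ss.length ≤ f2 →
      combineAltGo f1 ss b = combineAltGo f2 ss b := by
  intro f1
  induction f1 with
  | zero =>
    intro f2 ss h1 _
    have : ss = [] := List.length_eq_zero_iff.mp (Nat.le_zero.mp h1)
    subst this
    cases f2 <;> rfl
  | succ f1 ih =>
    intro f2 ss h1 h2
    cases ss with
    | nil => cases f2 <;> rfl
    | cons s ss =>
      cases f2 with
      | zero => simp at h2
      | succ f2 =>
        simp only [combineAltGo]
        congr 1
        apply ih
        all_goals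
          have hlen : (PySem.List.slice (s :: ss) (some b) none).length ≤ ss.length := by
            rw [PySem.List.slice_from _ (by omega)]
            simp
            omega
          simp only [List.length_cons] at h1 h2
          omega

-- one unfolding of B at the natural fuel, in take/drop form
lemma alt_unfold (b : Int) (hb : 1 ≤ b) (ss : List String) :
    combine_sentences_into_blocks_alt ss b =
      match ss with
      | [] => []
      | _ :: _ =>
          PySem.Str.join " " (ss.take b.toNat) ::
            combine_sentences_into_blocks_alt (ss.drop b.toNat) b := by
  cases ss with
  | nil => rfl
  | cons s ss =>
    simp only [combine_sentences_into_blocks_alt, List.length_cons, combineAltGo]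
    rw [PySem.List.slice_to _ (by omega), PySem.List.slice_from _ (by omega)]
    congr 1
    apply combineAltGo_fuel b hb
    · simp; omega
    · rfl

-- reference loop: A's fold with the index counter replaced by a countdown cnt
def loopSpec (b : Nat) : List String → Nat → List String → List String → List String
  | [], _, out, cur => if cur ≠ [] then out ++ [PySem.Str.join " " cur] else out
  | s :: ss, cnt, out, cur =>
      if cnt = 1 then loopSpec b ss b (out ++ [PySem.Str.join " " (cur ++ [s])]) []
      else loopSpec b ss (cnt - 1) out (cur ++ [s])

lemma emod_succ (b k : Int) (hb : 0 < b) :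
    (k + 1) % b = if k % b + 1 = b then 0 else k % b + 1 := by
  have hme : k % b + b * (k / b) = k := Int.emod_add_ediv k b
  have h0 : 0 ≤ k % b := Int.emod_nonneg k (by omega)
  have h1 : k % b < b := Int.emod_lt_of_pos k hb
  split_ifs with h
  · have : k + 1 = b * (1 + k / b) := by ring_nf; omega
    rw [this]
    exact Int.mul_emod_right _ _
  · have : k + 1 = (k % b + 1) + b * (k / b) := by omega
    rw [this, Int.add_mul_emod_self_left, Int.emod_eq_of_lt (by omega) (by omega)]

-- A's fold equals the countdown loop
lemma foldA (b : Int) (hb : 1 ≤ b) :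
    ∀ (ss : List String) (k : Int) (out cur : List String),
      (let st := (PySem.List.enumerate ss k).foldl
          (fun (st : List String × List String) p =>
            let current_block := st.2 ++ [p.2]
            if PySem.Int.mod (p.1 + 1) b = 0 then
              (st.1 ++ [PySem.Str.join " " current_block], ([] : List String))
            else (st.1, current_block))
          (out, cur)
       if st.2 ≠ [] then st.1 ++ [PySem.Str.join " " st.2] else st.1)
      = loopSpec b.toNat ss (b - PySem.Int.mod k b).toNat out cur := by
  intro ss
  induction ss with
  | nil => intro k out cur; rfl
  | cons s ss ih =>
    intro k out cur
    have hbpos : (0 : Int) < b := by omega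
    have hmod : PySem.Int.mod k b = k % b := PySem.Int.mod_eq_emod_of_pos hbpos
    have hmod1 : PySem.Int.mod (k + 1) b = (k + 1) % b := PySem.Int.mod_eq_emod_of_pos hbpos
    have h0 : 0 ≤ k % b := Int.emod_nonneg k (by omega)
    have h1 : k % b < b := Int.emod_lt_of_pos k hbpos
    rw [PySem.List.enumerate_cons]
    simp only [List.foldl_cons, loopSpec]
    by_cases hc : k % b + 1 = b
    · have hz : PySem.Int.mod (k + 1) b = 0 := by
        rw [hmod1, emod_succ b k hbpos]; simp [hc]
      have hcnt : (b - PySem.Int.mod k b).toNat = 1 := by rw [hmod]; omega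
      rw [hcnt]
      simp only [hz, if_pos rfl, if_true]
      rw [ih (k + 1) (out ++ [PySem.Str.join " " (cur ++ [s])]) []]
      congr 1
      rw [hmod1, emod_succ b k hbpos, if_pos hc]
      omega
    · have hnz : PySem.Int.mod (k + 1) b ≠ 0 := by
        rw [hmod1, emod_succ b k hbpos, if_neg hc]; omega
      have hcnt : (b - PySem.Int.mod k b).toNat ≠ 1 := by rw [hmod]; omega
      rw [if_neg hcnt]
      simp only [hnz, if_false, if_neg hnz]
      rw [ih (k + 1) out (cur ++ [s])]
      congr 1
      rw [hmod1, emod_succ b k hbpos, if_neg hc, hmod]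
      omega

-- the countdown loop equals B
lemma loopSpec_eq_alt (b : Int) (hb : 1 ≤ b) :
    ∀ (ss : List String) (cnt : Nat) (out cur : List String), 1 ≤ cnt → cnt ≤ b.toNat →
      loopSpec b.toNat ss cnt out cur =
        if ss = [] ∧ cur = [] then out
        else out ++ PySem.Str.join " " (cur ++ ss.take cnt) ::
              combine_sentences_into_blocks_alt (ss.drop cnt) b := by
  intro ss
  induction ss with
  | nil =>
    intro cnt out cur _ _
    simp only [loopSpec, List.take_nil, List.drop_nil, List.append_nil]
    by_cases hcur : cur = []
    · simp [hcur, combine_sentences_into_blocks_alt, combineAltGo]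
    · simp [hcur, combine_sentences_into_blocks_alt, combineAltGo]
  | cons s ss ih =>
    intro cnt out cur h1 h2
    simp only [loopSpec]
    by_cases hc : cnt = 1
    · subst hc
      rw [if_pos rfl]
      rw [ih b.toNat (out ++ [PySem.Str.join " " (cur ++ [s])]) [] (by omega) (le_refl _)]
      rw [show (s :: ss).take 1 = [s] from rfl, show (s :: ss).drop 1 = ss from rfl]
      rw [alt_unfold b hb ss]
      cases ss with
      | nil => simp [combine_sentences_into_blocks_alt, combineAltGo]
      | cons t ts => simp
    · rw [if_neg hc]
      rw [ih (cnt - 1) out (cur ++ [s]) (by omega) (by omega)]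
      have hne : cur ++ [s] ≠ [] := by simp
      simp only [hne, and_false, if_false]
      have hcons : s :: ss ≠ [] := by simp
      simp only [hcons, false_and, if_false]
      have htake : (s :: ss).take cnt = s :: ss.take (cnt - 1) := by
        cases cnt with
        | zero => omega
        | succ n => simp
      have hdrop : (s :: ss).drop cnt = ss.drop (cnt - 1) := by
        cases cnt with
        | zero => omega
        | succ n => simp
      rw [htake, hdrop]
      simp

-- ===== VERDICT (by name: the statement is the Claim_ definition above) =====
theorem combine_sentences_into_blocks_spec : Claim_equal_combine_sentences_into_blocks := by
  intro ss b _ hbp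
  have hb : 1 ≤ b := hbp
  unfold Spec_combine_sentences_into_blocks combine_sentences_into_blocks
  have hbpos : (0 : Int) < b := by omega
  rw [foldA b hb ss 0 [] []]
  have hm : PySem.Int.mod 0 b = 0 := by
    rw [PySem.Int.mod_eq_emod_of_pos hbpos]; simp
  rw [hm]
  rw [loopSpec_eq_alt b hb ss (b - 0).toNat [] [] (by omega) (by omega)]
  by_cases hss : ss = []
  · subst hss
    simp [combine_sentences_into_blocks_alt, combineAltGo]
  · simp only [hss, false_and, if_false, List.nil_append]
    rw [alt_unfold b hb ss]
    cases ss with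
    | nil => exact absurd rfl hss
    | cons t ts => simp
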